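-- pv_equiv track=rewrite | github.com/pypi-data/pypi-mirror-403 | packages/manuscript-ocr/manuscript_ocr-0.1.10-py3-none-any.whl/manuscript/correctors/_charlm/utils.py | _restore_case
-- ===== SOURCE A (Python) =====
-- def _restore_case(original, corrected):
--     result = []
--     for i, ch in enumerate(corrected):
--         if i < len(original) and original[i].isupper():
--             result.append(ch.upper())
--         else:
--             result.append(ch)
--     return "".join(result)
-- ===== SOURCE B (Python) =====
-- def _restore_case(original, corrected):
--     upper_positions = [i for i, ch in enumerate(original) if ch.isupper()]
--     out = list(corrected)
--     for i in upper_positions: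
--         if i < len(out):
--             out[i] = out[i].upper()
--     return "".join(out)
-- ===== Notes on version B (the rewrite author's own statement) =====
-- stated objective: alternative
-- what changed: Instead of building the result character by character while scanning corrected with a per-character bounds check, B first collects the uppercase index positions of original in one pass, then patches a mutable copy of corrected in place at exactly those positions.
import Mathlib
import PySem

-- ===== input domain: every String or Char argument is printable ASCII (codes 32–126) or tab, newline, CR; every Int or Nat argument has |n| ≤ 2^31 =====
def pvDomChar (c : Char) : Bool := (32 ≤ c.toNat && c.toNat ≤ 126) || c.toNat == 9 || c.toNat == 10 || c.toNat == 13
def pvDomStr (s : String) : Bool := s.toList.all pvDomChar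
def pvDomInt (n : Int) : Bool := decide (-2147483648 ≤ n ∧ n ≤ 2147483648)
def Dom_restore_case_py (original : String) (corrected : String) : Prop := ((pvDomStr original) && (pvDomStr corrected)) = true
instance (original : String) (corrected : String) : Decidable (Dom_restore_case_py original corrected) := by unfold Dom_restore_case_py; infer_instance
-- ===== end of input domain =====

-- B is an alternative decomposition: collect original's uppercase index positions in one pass, then patch a mutable copy of corrected at exactly those positions; same cost.


-- ===== PORT A =====
def restore_case_py (original : String) (corrected : String) : String :=
  let o := original.toList
  let result : List Char :=
    (PySem.List.enumerate corrected.toList 0).foldl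
      (fun acc p =>
        if decide (p.1 < (o.length : Int)) &&
            ((PySem.List.pyGet? o p.1).elim false PySem.Chars.isupper) then
          acc ++ [PySem.Chars.upperChar p.2]
        else
          acc ++ [p.2]) []
  String.mk result

-- ===== PORT B =====
def restore_case_py_alt (original : String) (corrected : String) : String :=
  let upper_positions : List Int :=
    ((PySem.List.enumerate original.toList 0).filter
      (fun p => PySem.Chars.isupper p.2)).map (·.1)
  let out := upper_positions.foldl
    (fun acc i =>
      if i < (acc.length : Int) then
        acc.set i.toNat (PySem.Chars.upperChar acc[i.toNat]!)
      else acc)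
    corrected.toList
  String.mk out

-- ===== PRECONDITION & SPEC =====
def Spec_restore_case_py (original : String) (corrected : String) (out : String) : Prop := out = restore_case_py_alt original corrected
instance (original : String) (corrected : String) (out : String) : Decidable (Spec_restore_case_py original corrected out) := by unfold Spec_restore_case_py; infer_instance

-- ===== CLAIM =====
def Claim_equal_restore_case_py : Prop := ∀ (original : String) (corrected : String), Dom_restore_case_py original corrected → Spec_restore_case_py original corrected (restore_case_py original corrected)

-- ===== LEMMAS AND PROOFS =====

-- characterisation of B's patch loop on a list of distinct, nonnegative indices
theorem patch_foldl_getElem? (idxs : List Int) (hnd : idxs.Nodup)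
    (h0 : ∀ i ∈ idxs, 0 ≤ i) (cs : List Char) (j : Nat) :
    (idxs.foldl
      (fun acc i =>
        if i < (acc.length : Int) then
          acc.set i.toNat (PySem.Chars.upperChar acc[i.toNat]!)
        else acc) cs)[j]?
    = if (j : Int) ∈ idxs then (cs[j]?).map PySem.Chars.upperChar else cs[j]? := by
  induction idxs generalizing cs with
  | nil => simp
  | cons i rest ih =>
      have hi0 : 0 ≤ i := h0 i (by simp)
      have hnd' : rest.Nodup := hnd.of_cons
      have hirest : i ∉ rest := (List.nodup_cons.mp hnd).1
      rw [List.foldl_cons, ih hnd' (fun x hx => h0 x (by simp [hx]))]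
      by_cases hij : (j : Int) = i
      · have hjrest : (j : Int) ∉ rest := hij ▸ hirest
        have hmemc : (j : Int) ∈ i :: rest := List.mem_cons.mpr (Or.inl hij)
        have hti : i.toNat = j := by omega
        by_cases hlt : i < (cs.length : Int)
        · have hjc : j < cs.length := by omega
          rw [if_pos hlt, hti, if_neg hjrest, if_pos hmemc, List.getElem?_set,
            if_pos rfl, if_pos hjc, getElem!_pos cs j hjc, List.getElem?_eq_getElem hjc]
          simp
        · have hjc : cs.length ≤ j := by omega
          rw [if_neg hlt, if_neg hjrest, if_pos hmemc]
          simp [List.getElem?_eq_none hjc]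
      · have hji : ¬ i.toNat = j := by omega
        simp only [List.mem_cons, hij, false_or]
        by_cases hlt : i < (cs.length : Int)
        · rw [if_pos hlt, List.getElem?_set, if_neg hji]
        · rw [if_neg hlt]

-- the Int indices with uppercase original character
theorem mem_upper_positions (o : List Char) (j : Nat) :
    ((j : Int) ∈ ((PySem.List.enumerate o 0).filter
      (fun p => PySem.Chars.isupper p.2)).map (·.1))
    ↔ ∃ h : j < o.length, PySem.Chars.isupper o[j] = true := by
  constructor
  · rintro hmem
    obtain ⟨p, hp, hfst⟩ := List.mem_map.mp hmem
    obtain ⟨hpe, hup⟩ := List.mem_filter.mp hp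
    obtain ⟨k, hk, rfl⟩ := (PySem.List.mem_enumerate_iff _ _ _).mp hpe
    have : j = k := by simpa using hfst.symm
    subst this
    exact ⟨hk, by simpa using hup⟩
  · rintro ⟨hj, hup⟩
    refine List.mem_map.mpr ⟨((j : Int), o[j]), List.mem_filter.mpr ⟨?_, by simpa using hup⟩, rfl⟩
    exact (PySem.List.mem_enumerate_iff _ _ _).mpr ⟨j, hj, by simp⟩

-- the upper-position list is nodup and nonnegative
theorem upper_positions_nodup (o : List Char) :
    (((PySem.List.enumerate o 0).filter
      (fun p => PySem.Chars.isupper p.2)).map (·.1)).Nodup := by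
  have hp : ((PySem.List.enumerate o 0).filter
      (fun p => PySem.Chars.isupper p.2)).Pairwise (fun p q => p.1 < q.1) :=
    (PySem.List.pairwise_lt_enumerate o 0).filter _
  have hm := List.Pairwise.map (S := fun (a b : Int) => a < b)
    (fun p : Int × Char => p.1) (fun a b h => h) hp
  exact hm.imp (fun h => ne_of_lt h)

theorem upper_positions_nonneg (o : List Char) :
    ∀ i ∈ (((PySem.List.enumerate o 0).filter
      (fun p => PySem.Chars.isupper p.2)).map (·.1)), 0 ≤ i := by
  intro i hi
  obtain ⟨p, hp, hfst⟩ := List.mem_map.mp hi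
  obtain ⟨hpe, _⟩ := List.mem_filter.mp hp
  obtain ⟨k, hk, rfl⟩ := (PySem.List.mem_enumerate_iff _ _ _).mp hpe
  simp [← hfst]

-- A's loop is a map over the enumeration
theorem A_loop_eq_map (o cs : List Char) (acc : List Char) :
    (PySem.List.enumerate cs 0).foldl
      (fun acc p =>
        if decide (p.1 < (o.length : Int)) &&
            ((PySem.List.pyGet? o p.1).elim false PySem.Chars.isupper) then
          acc ++ [PySem.Chars.upperChar p.2]
        else
          acc ++ [p.2]) acc
    = acc ++ (PySem.List.enumerate cs 0).map
        (fun p =>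
          if decide (p.1 < (o.length : Int)) &&
              ((PySem.List.pyGet? o p.1).elim false PySem.Chars.isupper) then
            PySem.Chars.upperChar p.2
          else p.2) := by
  have hf : (fun (acc : List Char) (p : Int × Char) =>
        if decide (p.1 < (o.length : Int)) &&
            ((PySem.List.pyGet? o p.1).elim false PySem.Chars.isupper) then
          acc ++ [PySem.Chars.upperChar p.2]
        else
          acc ++ [p.2])
      = (fun acc p => acc ++ [if decide (p.1 < (o.length : Int)) &&
            ((PySem.List.pyGet? o p.1).elim false PySem.Chars.isupper) then
          PySem.Chars.upperChar p.2 else p.2]) := by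
    funext acc p; split <;> rfl
  rw [hf, PySem.List.foldl_append_singleton_eq_map]

-- ===== VERDICT =====
theorem restore_case_py_spec : Claim_equal_restore_case_py := by
  intro original corrected _
  unfold Spec_restore_case_py restore_case_py restore_case_py_alt
  dsimp only
  set o := original.toList
  set cs := corrected.toList
  rw [A_loop_eq_map o cs, List.nil_append]
  apply congrArg String.mk
  apply List.ext_getElem?
  intro j
  rw [patch_foldl_getElem? _ (upper_positions_nodup o) (upper_positions_nonneg o) cs j,
    List.getElem?_map, PySem.List.getElem?_enumerate]
  by_cases hul : ∃ h : j < o.length, PySem.Chars.isupper o[j] = true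
  · rw [if_pos ((mem_upper_positions o j).mpr hul)]
    obtain ⟨hj, hup⟩ := hul
    cases hc : cs[j]? with
    | none => simp
    | some ch =>
        simp only [Option.map_some]
        simp [hj]
        intro hcontra
        simp [hup] at hcontra
  · rw [if_neg (fun hmem => hul ((mem_upper_positions o j).mp hmem))]
    cases hc : cs[j]? with
    | none => simp
    | some ch =>
        simp only [Option.map_some]
        simp [PySem.List.pyGet?_natCast]
        intro hj htrue
        have hj' : j < o.length := by omega
        rw [List.getElem?_eq_getElem hj'] at htrue
        simp at htrue
        exact (hul ⟨hj', htrue⟩).elim
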